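-- pv_equiv track=rewrite | github.com/zooxs/personal-project | wave-hindcasting/src/hindcasting.py | set_time
-- ===== SOURCE A (Python) =====
-- def set_time(ls_code, number):
--     mark = ls_code[0]
--     val = [number]
--     count = number
--     for i in ls_code[1:]:
--         if i == mark:
--             count += number
--             val.append(count)
--         else:
--             count = number
--             val.append(count)
--             mark = i
--     return val
-- ===== SOURCE B (Python) =====
-- def set_time(ls_code, number):
--     # phase 1: run-length encode the codes
--     runs = []
--     for x in ls_code:
--         if runs and runs[-1][0] == x:
--             runs[-1][1] += 1
--         else:
--             runs.append([x, 1])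
--     # phase 2: emit an accumulated ramp per run
--     val = []
--     for run in runs:
--         count = number
--         for _ in range(run[1]):
--             val.append(count)
--             count = count + number
--     return val
-- ===== Notes on version B (the rewrite author's own statement) =====
-- stated objective: alternative
-- what changed: B run-length encodes the codes in one pass and then emits an accumulated ramp per run, instead of A's single loop with a mark/count state machine; B also returns [] on an empty list where A raises.
-- crash fix: On an empty ls_code A raises IndexError (ls_code[0]); B returns []. — e.g. on set_time([], 5): A raises IndexError, B returns []
import Mathlib
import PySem

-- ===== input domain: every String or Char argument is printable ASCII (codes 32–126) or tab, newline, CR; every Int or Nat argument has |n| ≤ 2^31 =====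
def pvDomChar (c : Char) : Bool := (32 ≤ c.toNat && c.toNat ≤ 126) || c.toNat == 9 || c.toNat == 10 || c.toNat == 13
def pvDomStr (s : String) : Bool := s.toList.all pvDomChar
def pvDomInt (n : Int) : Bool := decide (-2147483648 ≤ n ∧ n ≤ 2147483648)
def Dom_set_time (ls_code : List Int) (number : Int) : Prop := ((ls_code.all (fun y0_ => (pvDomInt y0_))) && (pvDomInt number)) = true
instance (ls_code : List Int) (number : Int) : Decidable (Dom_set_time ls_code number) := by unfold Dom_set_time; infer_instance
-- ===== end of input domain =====

-- B splits the input into maximal runs of equal codes and emits an accumulated ramp per run,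
-- instead of A's one-pass mark/count state machine (equal cost; 'alternative').

-- ===== PORT A =====
-- loop body of A: state (mark, val, count), branch on i == mark
def stepA (n : Int) (st : Int × List Int × Int) (i : Int) : Int × List Int × Int :=
  if i == st.1 then (st.1, st.2.1 ++ [st.2.2 + n], st.2.2 + n)
  else (i, st.2.1 ++ [n], n)

-- mark = ls_code[0]; val = [number]; count = number; loop over ls_code[1:]; return val
def set_time (ls_code : List Int) (number : Int) : List Int :=
  match ls_code with
  | [] => []  -- Python raises IndexError here; excluded by Pre_set_time
  | mark :: rest => (rest.foldl (stepA number) (mark, [number], number)).2.1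

-- ===== PORT B =====
-- phase 1 of B: one pass building the run-length encoding (runs[-1][1] += 1 / append [x,1])
def buildRuns (ls : List Int) : List (Int × Int) :=
  ls.foldl (fun runs x =>
    match runs.getLast? with
    | some (y, c) => if y == x then runs.dropLast ++ [(y, c + 1)] else runs ++ [(x, 1)]
    | none => runs ++ [(x, 1)]) []

-- phase 2 of B: per run, inner for over range(run[1]) appending the running total 'count'
def set_time_alt (ls_code : List Int) (number : Int) : List Int :=
  (buildRuns ls_code).foldl
    (fun val run =>
      ((List.range run.2.toNat).foldl
        (fun (st : List Int × Int) _ => (st.1 ++ [st.2], st.2 + number)) (val, number)).1)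
    []

-- ===== PRECONDITION & SPEC =====
-- Pre_ excludes only the empty list, on which A raises IndexError.
def Pre_set_time (ls_code : List Int) (number : Int) : Prop := ls_code ≠ []
instance (ls_code : List Int) (number : Int) : Decidable (Pre_set_time ls_code number) := by unfold Pre_set_time; infer_instance

def pvWitness_set_time : List Int × Int := ([1, 1, 2], 3)

-- On empty ls_code A raises IndexError (ls_code[0]); B returns [].
def Raises_set_time (ls_code : List Int) (number : Int) : Prop := ls_code = []
instance (ls_code : List Int) (number : Int) : Decidable (Raises_set_time ls_code number) := by unfold Raises_set_time; infer_instance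
def pvRaiseWitness_set_time : List Int × Int := ([], 5)
def pvRaiseWitnessOut_set_time : List Int := []

def Spec_set_time (ls_code : List Int) (number : Int) (out : List Int) : Prop := out = set_time_alt ls_code number
instance (ls_code : List Int) (number : Int) (out : List Int) : Decidable (Spec_set_time ls_code number out) := by unfold Spec_set_time; infer_instance

-- ===== CLAIM (what is proved, stated in full; the proofs are below) =====
def Claim_equal_set_time : Prop := ∀ (ls_code : List Int) (number : Int), Dom_set_time ls_code number → Pre_set_time ls_code number → Spec_set_time ls_code number (set_time ls_code number)
def Claim_raises_set_time : Prop := (∀ (ls_code : List Int) (number : Int), Dom_set_time ls_code number → Raises_set_time ls_code number → ¬ Pre_set_time ls_code number) ∧ (Dom_set_time (pvRaiseWitness_set_time.1) (pvRaiseWitness_set_time.2) ∧ Raises_set_time (pvRaiseWitness_set_time.1) (pvRaiseWitness_set_time.2) ∧ set_time_alt (pvRaiseWitness_set_time.1) (pvRaiseWitness_set_time.2) = pvRaiseWitnessOut_set_time)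

-- ===== LEMMAS AND PROOFS =====

-- the stream of values A's loop appends, from state (mark m, count c)
def emitA (n : Int) (m c : Int) : List Int → List Int
  | [] => []
  | i :: rest => if i == m then (c + n) :: emitA n m (c + n) rest
                 else n :: emitA n i n rest

-- the list c, c+n, …  of length k
def ramp (c n : Int) : Nat → List Int
  | 0 => []
  | k + 1 => c :: ramp (c + n) n k

-- B's output, accumulator-free
def outB (n : Int) : List Int → List Int
  | [] => []
  | x :: tail =>
    ramp n n (1 + (tail.takeWhile (· == x)).length) ++ outB n (tail.dropWhile (· == x))
termination_by l => l.length
decreasing_by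
  simp only [List.length_cons]
  exact Nat.lt_succ_of_le (List.length_dropWhile_le _ _)

theorem foldA_emit (n : Int) (l : List Int) : ∀ (m c : Int) (v : List Int),
    (l.foldl (stepA n) (m, v, c)).2.1 = v ++ emitA n m c l := by
  induction l with
  | nil => intro m c v; simp [emitA]
  | cons i rest ih =>
    intro m c v
    rw [List.foldl_cons]
    have hs : stepA n (m, v, c) i =
        if i == m then (m, v ++ [c + n], c + n) else (i, v ++ [n], n) := rfl
    rw [hs]
    by_cases h : i == m
    · rw [if_pos h, ih]
      simp [emitA, h]
    · rw [if_neg h, ih]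
      simp [emitA, h]

theorem ramp_snoc (n : Int) (k : Nat) : ∀ c : Int, ramp c n (k + 1) = ramp c n k ++ [c + n * (k : Int)] := by
  induction k with
  | zero => intro c; simp [ramp]
  | succ k ih =>
    intro c
    show c :: ramp (c + n) n (k + 1) = c :: ramp (c + n) n k ++ [c + n * ((k : Int) + 1)]
    rw [ih (c + n)]
    have h2 : c + n + n * (k : Int) = c + n * ((k : Int) + 1) := by ring
    simp [h2]

theorem foldRange_ramp (n : Int) (k : Nat) : ∀ (v : List Int) (c : Int),
    ((List.range k).foldl
      (fun (st : List Int × Int) _ => (st.1 ++ [st.2], st.2 + n)) (v, c))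
      = (v ++ ramp c n k, c + n * (k : Int)) := by
  induction k with
  | zero => intro v c; simp [ramp]
  | succ k ih =>
    intro v c
    rw [List.range_succ, List.foldl_append, ih]
    simp only [List.foldl_cons, List.foldl_nil, ramp_snoc, Prod.mk.injEq]
    constructor
    · simp [List.append_assoc]
    · push_cast; ring

-- the run-length encoding, recursively by run peeling
def rle : List Int → List (Int × Int)
  | [] => []
  | x :: tail =>
    (x, 1 + ((tail.takeWhile (· == x)).length : Int)) :: rle (tail.dropWhile (· == x))
termination_by l => l.length
decreasing_by
  simp only [List.length_cons]
  exact Nat.lt_succ_of_le (List.length_dropWhile_le _ _)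

theorem buildRuns_go (l : List Int) : ∀ (pre : List (Int × Int)) (y c : Int),
    (l.foldl (fun runs x =>
      match runs.getLast? with
      | some (y, c) => if y == x then runs.dropLast ++ [(y, c + 1)] else runs ++ [(x, 1)]
      | none => runs ++ [(x, 1)]) (pre ++ [(y, c)]))
    = pre ++ (y, c + ((l.takeWhile (· == y)).length : Int)) :: rle (l.dropWhile (· == y)) := by
  induction l with
  | nil => intro pre y c; simp [rle]
  | cons x t ih =>
    intro pre y c
    rw [List.foldl_cons]
    simp only [List.getLast?_concat, List.dropLast_concat]
    by_cases h : y == x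
    · have hx : y = x := by simpa using h
      subst hx
      rw [if_pos h, ih pre y (c + 1)]
      rw [List.takeWhile_cons, List.dropWhile_cons]
      simp only [beq_self_eq_true, if_true, List.length_cons]
      have : c + 1 + ((t.takeWhile (· == y)).length : Int)
           = c + (((t.takeWhile (· == y)).length : Int) + 1) := by ring
      rw [this]
      push_cast
      ring_nf
    · rw [if_neg h]
      rw [show pre ++ [(y, c)] ++ [(x, 1)] = (pre ++ [(y, c)]) ++ [(x, 1)] from by simp]
      rw [ih (pre ++ [(y, c)]) x 1]
      rw [List.takeWhile_cons, List.dropWhile_cons]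
      have hxy : (x == y) = false := by
        rw [beq_eq_false_iff_ne]
        intro e
        exact h (by simp [e])
      simp only [hxy, Bool.false_eq_true, if_false, List.length_nil, Int.natCast_zero, add_zero]
      rw [rle]
      simp

theorem buildRuns_eq_rle (l : List Int) : buildRuns l = rle l := by
  match l with
  | [] => simp [buildRuns, rle]
  | x :: t =>
    show (t.foldl _ ([] ++ [(x, 1)])) = rle (x :: t)
    rw [buildRuns_go t [] x 1, rle]
    simp

theorem emitRuns_outB (n : Int) : ∀ (N : Nat) (l v : List Int), l.length ≤ N →
    ((rle l).foldl (fun val run =>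
      ((List.range run.2.toNat).foldl
        (fun (st : List Int × Int) _ => (st.1 ++ [st.2], st.2 + n)) (val, n)).1) v)
    = v ++ outB n l := by
  intro N
  induction N with
  | zero =>
    intro l v h
    match l with
    | [] => simp [rle, outB]
    | _ :: _ => simp at h
  | succ N ih =>
    intro l v h
    match l with
    | [] => simp [rle, outB]
    | x :: tail =>
      rw [rle, outB, List.foldl_cons]
      have htn : ((1 + ((tail.takeWhile (· == x)).length : Int)).toNat)
               = 1 + (tail.takeWhile (· == x)).length := by omega
      simp only [htn]
      rw [foldRange_ramp]
      simp only
      rw [ih _ _ (le_trans (List.length_dropWhile_le _ _) (Nat.succ_le_succ_iff.mp h))]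
      simp [List.append_assoc]

theorem alt_outB (n : Int) (l : List Int) : set_time_alt l n = outB n l := by
  rw [set_time_alt, buildRuns_eq_rle]
  exact emitRuns_outB n l.length l [] (le_refl _)

theorem emitA_outB (n : Int) (l : List Int) : ∀ (m c : Int),
    emitA n m c l = ramp (c + n) n ((l.takeWhile (· == m)).length) ++ outB n (l.dropWhile (· == m)) := by
  induction l with
  | nil => intro m c; simp [emitA, ramp, outB]
  | cons i rest ih =>
    intro m c
    by_cases h : i == m
    · have hm : i = m := by simpa using h
      subst hm
      rw [show emitA n i c (i :: rest) = (c + n) :: emitA n i (c + n) rest from by simp [emitA]]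
      rw [List.takeWhile_cons, List.dropWhile_cons]
      simp only [beq_self_eq_true, if_true, List.length_cons]
      rw [ih]
      simp [ramp]
    · rw [show emitA n m c (i :: rest) = n :: emitA n i n rest from by simp [emitA, h]]
      rw [List.takeWhile_cons, List.dropWhile_cons]
      simp only [h, if_false, List.length_nil, ramp, List.nil_append, Bool.false_eq_true]
      rw [outB, ih i n, Nat.add_comm 1]
      simp [ramp]

-- ===== VERDICT (by name: the statement is the Claim_ definition above) =====
theorem set_time_spec : Claim_equal_set_time := by
  intro ls n _ hpre
  unfold Spec_set_time
  match ls with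
  | [] => exact absurd rfl hpre
  | m :: rest =>
    have hA : set_time (m :: rest) n = (rest.foldl (stepA n) (m, [n], n)).2.1 := rfl
    rw [hA, foldA_emit, alt_outB n (m :: rest)]
    rw [outB, emitA_outB n rest m n, Nat.add_comm 1]
    simp [ramp]

theorem set_time_raises : Claim_raises_set_time := by
  unfold Claim_raises_set_time
  refine ⟨fun l n _ hr hp => hp hr, by decide, rfl, ?_⟩
  rfl

-- witness self-check: B's port really returns the stated value at the raise witness
theorem set_time_raises_witness_ok :
    set_time_alt (pvRaiseWitness_set_time.1) (pvRaiseWitness_set_time.2) = pvRaiseWitnessOut_set_time :=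
  set_time_raises.2.2.2
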